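-- pv_equiv track=rewrite | github.com/JoseRaulBS/HighResMS | model.py | separate_formula
-- ===== SOURCE A (Python) =====
-- def separate_formula(formula):
--     elements = []
--     curr_element = ""
--
--     for letter in formula:
--
--         if letter == " ":
--             continue
--         elif letter.isupper():
--             elements.append(curr_element)
--             curr_element = letter
--         else:
--             curr_element += letter
--     elements.append(curr_element)
--     elements = [x for x in elements if len(x) > 0]
--     return elements
-- ===== SOURCE B (Python) =====
-- def separate_formula(formula):
--     s = formula.replace(" ", "")
--     tokens = []
--     i = 0
--     n = len(s)
--     while i < n:
--         j = i + 1
--         while j < n and not s[j].isupper():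
--             j += 1
--         tokens.append(s[i:j])
--         i = j
--     return tokens
-- ===== Notes on version B (the rewrite author's own statement) =====
-- stated objective: alternative
-- what changed: B strips all spaces once and then slices the string directly at uppercase boundaries with a two-index scan, emitting each token as a slice; A's per-character accumulator, trailing append and empty-string filter disappear.
import Mathlib
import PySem

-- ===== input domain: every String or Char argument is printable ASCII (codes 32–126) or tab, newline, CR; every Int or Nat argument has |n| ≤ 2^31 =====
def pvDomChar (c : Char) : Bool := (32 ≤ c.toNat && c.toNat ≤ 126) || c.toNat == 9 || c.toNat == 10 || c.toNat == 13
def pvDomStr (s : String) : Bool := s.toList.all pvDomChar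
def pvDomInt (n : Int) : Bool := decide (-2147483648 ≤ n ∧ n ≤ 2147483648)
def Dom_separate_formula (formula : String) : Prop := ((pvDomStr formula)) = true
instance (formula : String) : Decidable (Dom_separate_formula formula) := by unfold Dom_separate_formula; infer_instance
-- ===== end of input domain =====

-- B strips spaces once, then slices at uppercase boundaries with a two-index scan (alternative structure, same cost).

-- Python's single-char str.isupper(), exact on the ASCII domain.
def pvIsUpper (c : Char) : Bool := 'A' ≤ c && c ≤ 'Z'

-- ===== PORT A =====
-- the loop body of A: skip spaces, flush on uppercase, else extend the accumulator
def pvStepA (st : List (List Char) × List Char) (c : Char) : List (List Char) × List Char :=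
  if c = ' ' then st
  else if pvIsUpper c then (st.1 ++ [st.2], [c])
  else (st.1, st.2 ++ [c])

def separate_formula (formula : String) : List String :=
  let st := formula.toList.foldl pvStepA ([], [])
  ((st.1 ++ [st.2]).filter (fun x => decide (x.length > 0))).map (fun x => String.ofList x)

-- ===== PORT B =====
def pvNonUpper (c : Char) : Bool := !(pvIsUpper c)

-- B's outer while loop; the inner index scan s[i+1:j] is the run of non-uppercase
-- characters after position i (takeWhile/dropWhile), the slice s[i:j] is the emitted token.
def pvTokens : List Char → List (List Char)
  | [] => []
  | c :: rest =>
      (c :: rest.takeWhile pvNonUpper) :: pvTokens (rest.dropWhile pvNonUpper)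
termination_by t => t.length
decreasing_by
  simpa using Nat.lt_succ_of_le (List.length_dropWhile_le _ _)

def separate_formula_alt (formula : String) : List String :=
  -- formula.replace(" ", "") on single characters is exactly dropping every ' '
  (pvTokens (formula.toList.filter (fun c => c != ' '))).map (fun x => String.ofList x)

-- ===== PRECONDITION & SPEC =====
def Spec_separate_formula (formula : String) (out : List String) : Prop := out = separate_formula_alt formula
instance (formula : String) (out : List String) : Decidable (Spec_separate_formula formula out) := by unfold Spec_separate_formula; infer_instance

-- ===== CLAIM (what is proved, stated in full; the proofs are below) =====
def Claim_equal_separate_formula : Prop := ∀ (formula : String), Dom_separate_formula formula → Spec_separate_formula formula (separate_formula formula)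

-- ===== LEMMAS AND PROOFS =====

-- A's accumulator list is only ever appended to: the starting accumulator is a prefix.
theorem pv_foldl_acc (s : List Char) (acc : List (List Char)) (curr : List Char) :
    s.foldl pvStepA (acc, curr)
      = (acc ++ (s.foldl pvStepA ([], curr)).1, (s.foldl pvStepA ([], curr)).2) := by
  induction s generalizing acc curr with
  | nil => simp
  | cons c t ih =>
    simp only [List.foldl_cons, pvStepA]
    split_ifs with h1 h2
    · exact ih acc curr
    · simp only [List.nil_append]
      rw [ih (acc ++ [curr]) [c], ih [curr] [c]]
      simp
    · exact ih acc (curr ++ [c])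

-- Spaces are skipped by A's loop, so folding over the space-free string is the same.
theorem pv_foldl_filter (s : List Char) (st : List (List Char) × List Char) :
    s.foldl pvStepA st = (s.filter (fun c => c != ' ')).foldl pvStepA st := by
  induction s generalizing st with
  | nil => rfl
  | cons c t ih =>
    by_cases hc : c = ' '
    · subst hc
      simp [pvStepA, ih]
    · simp [hc, ih]

-- On a space-free tail, A's flush-and-filter result from a NONEMPTY accumulator is the
-- accumulator extended by the non-uppercase run, followed by B's tokens of the rest.
theorem pv_run (s : List Char) (curr : List Char)
    (hs : ∀ c ∈ s, c ≠ ' ') (hcurr : curr ≠ []) :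
    ((s.foldl pvStepA ([], curr)).1 ++ [(s.foldl pvStepA ([], curr)).2]).filter
        (fun x => decide (x.length > 0))
      = (curr ++ s.takeWhile pvNonUpper) :: pvTokens (s.dropWhile pvNonUpper) := by
  induction s generalizing curr with
  | nil =>
    simp [pvTokens, List.length_pos_iff, hcurr]
  | cons d t ih =>
    have hd : d ≠ ' ' := hs d (by simp)
    by_cases hu : pvIsUpper d = true
    · simp only [List.foldl_cons, pvStepA, if_neg hd, hu, if_true, List.nil_append]
      rw [pv_foldl_acc t [curr] [d]]
      have hnd : pvNonUpper d = false := by simp [pvNonUpper, hu]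
      have hih := ih (curr := [d]) (fun c hc => hs c (List.mem_cons_of_mem _ hc)) (by simp)
      rw [List.append_assoc, List.singleton_append,
        List.filter_cons_of_pos (by simp [List.length_pos_iff, hcurr]), hih]
      simp [pvTokens, hnd]
    · have hu' : pvNonUpper d = true := by simp [pvNonUpper, hu]
      simp only [List.foldl_cons, pvStepA, if_neg hd, hu, List.nil_append]
      have := ih (curr := curr ++ [d]) (fun c hc => hs c (by simp [hc])) (by simp)
      simp only [Bool.false_eq_true, if_false] at this ⊢
      rw [this]
      simp [hu']

-- On a space-free string, A's whole computation equals B's token scan.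
theorem pv_main (s : List Char) (hs : ∀ c ∈ s, c ≠ ' ') :
    ((s.foldl pvStepA ([], ([] : List Char))).1 ++ [(s.foldl pvStepA ([], ([] : List Char))).2]).filter
        (fun x => decide (x.length > 0))
      = pvTokens s := by
  cases s with
  | nil => simp [pvTokens]
  | cons c t =>
    have hc : c ≠ ' ' := hs c (by simp)
    have ht : ∀ x ∈ t, x ≠ ' ' := fun x hx => hs x (by simp [hx])
    by_cases hu : pvIsUpper c = true
    · simp only [List.foldl_cons, pvStepA, if_neg hc, hu, if_true, List.nil_append]
      rw [pv_foldl_acc t [[]] [c]]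
      have := pv_run t [c] ht (by simp)
      simp only [List.cons_append, List.filter_cons] at *
      simp [pvTokens, this]
    · simp only [List.foldl_cons, pvStepA, if_neg hc, hu, List.nil_append]
      have := pv_run t [c] ht (by simp)
      simp only [Bool.false_eq_true, if_false] at this ⊢
      rw [this]
      simp [pvTokens]

-- ===== VERDICT (by name: the statement is the Claim_ definition above) =====
theorem separate_formula_spec : Claim_equal_separate_formula := by
  intro formula _
  simp only [Spec_separate_formula, separate_formula, separate_formula_alt]
  rw [pv_foldl_filter]
  rw [pv_main (formula.toList.filter (fun c => c != ' '))
        (by intro c hc; simpa using (List.of_mem_filter hc))]
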